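-- pv_equiv track=rewrite | github.com/thaReal/MasterChef | codeforces/ed_round_88/square.py | solve
-- ===== SOURCE A (Python) =====
-- def solve(n, m, x, y, a):
-- 	A = []
-- 	for row in a:
-- 		nrow = []
-- 		for char in row:
-- 			if char == '*':
-- 				nrow.append(0)
-- 			else:
-- 				nrow.append(1)
-- 		A.append(nrow)
--
-- 	if y >= 2 * x:
-- 		res = 0
-- 		for row in A:
-- 			res += sum(row)
-- 		return res * x
--
-- 	else:
-- 		res = {1: 0, 2: 0}
-- 		for row in A:
-- 			i = 0
-- 			while i < m:
-- 				if i != m - 1: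
-- 					if row[i] + row[i+1] == 2:
-- 						res[2] += 1
-- 						i += 2
-- 					elif row[i] == 1:
-- 						res[1] += 1
-- 						i += 2
-- 					else:
-- 						i += 1
--
-- 				else:
-- 					if row[i] == 1:
-- 						res[1] += 1
-- 					i += 1
--
-- 		return res[1] * x + res[2] * y
-- ===== SOURCE B (Python) =====
-- def solve(n, m, x, y, a):
--     if y >= 2 * x:
--         return x * sum(sum(1 for c in row if c != '*') for row in a)
--     total = 0
--     for row in a:
--         run = 0
--         for c in row[:max(0, m)]:
--             if c != '*':
--                 run += 1
--             else:
--                 total += (run // 2) * y + (run % 2) * x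
--                 run = 0
--         total += (run // 2) * y + (run % 2) * x
--     return total
-- ===== Notes on version B (the rewrite author's own statement) =====
-- stated objective: simpler
-- what changed: Replaces the explicit index-jumping while loop (i+=2/i+=1 with a lookahead at i+1 and a special last-column case) by a single run-length pass per row: count each maximal run of empty cells and add run//2 dominoes and run%2 singles; the cheap branch becomes a direct count of non-'*' cells.
import Mathlib
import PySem

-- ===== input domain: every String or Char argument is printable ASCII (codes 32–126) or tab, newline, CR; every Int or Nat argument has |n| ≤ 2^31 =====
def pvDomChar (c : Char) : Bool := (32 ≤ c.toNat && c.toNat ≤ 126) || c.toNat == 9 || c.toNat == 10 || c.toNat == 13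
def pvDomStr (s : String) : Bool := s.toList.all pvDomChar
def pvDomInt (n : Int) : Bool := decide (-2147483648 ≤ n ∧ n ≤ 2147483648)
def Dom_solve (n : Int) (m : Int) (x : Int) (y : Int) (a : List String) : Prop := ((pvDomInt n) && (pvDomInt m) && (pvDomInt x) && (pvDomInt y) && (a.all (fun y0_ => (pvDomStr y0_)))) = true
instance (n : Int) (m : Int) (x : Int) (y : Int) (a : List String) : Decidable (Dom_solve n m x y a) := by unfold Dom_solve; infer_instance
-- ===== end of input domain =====

-- B replaces A's index-jumping greedy while loop by a per-row run-length pass (run//2 dominoes + run%2 singles per maximal empty run); same values, simpler decomposition.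


-- ===== PORT A =====
-- the while loop of A over one (0/1-mapped) row; row[i] via pyGet? with default 0 (Pre_ keeps all accesses in range)
def solveLoopA (row : List Int) (m : Int) (i : Int) (s1 : Int) (s2 : Int) : Int × Int :=
  if _h : i < m then
    if i ≠ m - 1 then
      if (PySem.List.pyGet? row i).getD 0 + (PySem.List.pyGet? row (i+1)).getD 0 = 2 then
        solveLoopA row m (i+2) s1 (s2+1)
      else if (PySem.List.pyGet? row i).getD 0 = 1 then
        solveLoopA row m (i+2) (s1+1) s2
      else
        solveLoopA row m (i+1) s1 s2
    else
      if (PySem.List.pyGet? row i).getD 0 = 1 then solveLoopA row m (i+1) (s1+1) s2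
      else solveLoopA row m (i+1) s1 s2
  else (s1, s2)
termination_by (m - i).toNat
decreasing_by all_goals omega

def solve (n : Int) (m : Int) (x : Int) (y : Int) (a : List String) : Int :=
  let A := a.map (fun row => row.toList.map (fun c => if c = '*' then (0 : Int) else 1))
  if y ≥ 2 * x then
    (A.foldl (fun res row => res + row.foldl (· + ·) 0) 0) * x
  else
    let p := A.foldl (fun (p : Int × Int) row => solveLoopA row m 0 p.1 p.2) (0, 0)
    p.1 * x + p.2 * y

-- ===== PORT B =====
-- cost of one row: run-length pass, flushing run//2 dominoes + run%2 singles at each '*' and at row end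
def rowCostB (cs : List Char) (x : Int) (y : Int) : Int :=
  let p := cs.foldl (fun (p : Int × Int) c =>
      if c ≠ '*' then (p.1, p.2 + 1)
      else (p.1 + PySem.Int.floordiv p.2 2 * y + PySem.Int.mod p.2 2 * x, 0)) (0, 0)
  p.1 + PySem.Int.floordiv p.2 2 * y + PySem.Int.mod p.2 2 * x

def solve_alt (n : Int) (m : Int) (x : Int) (y : Int) (a : List String) : Int :=
  if y ≥ 2 * x then
    x * a.foldl (fun s row => s + ((row.toList.filter (· ≠ '*')).length : Int)) 0
  else
    a.foldl (fun t row => t + rowCostB (row.toList.take (max 0 m).toNat) x y) 0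

-- ===== PRECONDITION & SPEC =====
-- Pre_ is exactly A's non-raising domain: with y < 2*x and m ≥ 1, A indexes row[i] for some i ≥ len(row)
-- (IndexError) whenever a row is shorter than m; otherwise A returns.
def Pre_solve (n : Int) (m : Int) (x : Int) (y : Int) (a : List String) : Prop :=
  y ≥ 2 * x ∨ m ≤ 0 ∨ ∀ row ∈ a, m ≤ (row.toList.length : Int)
instance (n : Int) (m : Int) (x : Int) (y : Int) (a : List String) : Decidable (Pre_solve n m x y a) := by unfold Pre_solve; infer_instance

def pvWitness_solve : Int × Int × Int × Int × List String := (2, 3, 1, 1, ["*..", ".*."])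

def Spec_solve (n : Int) (m : Int) (x : Int) (y : Int) (a : List String) (out : Int) : Prop := out = solve_alt n m x y a
instance (n : Int) (m : Int) (x : Int) (y : Int) (a : List String) (out : Int) : Decidable (Spec_solve n m x y a out) := by unfold Spec_solve; infer_instance

-- ===== CLAIM (what is proved, stated in full; the proofs are below) =====
def Claim_equal_solve : Prop := ∀ (n : Int) (m : Int) (x : Int) (y : Int) (a : List String), Dom_solve n m x y a → Pre_solve n m x y a → Spec_solve n m x y a (solve n m x y a)

-- ===== LEMMAS AND PROOFS =====

-- canonical greedy count on a 0/1 segment carrying the current run length r: (singles, dominoes)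
def specRun (r : Int) : List Int → Int × Int
  | [] => (r % 2, r / 2)
  | v :: t => if v = 1 then specRun (r + 1) t
              else ((specRun 0 t).1 + r % 2, (specRun 0 t).2 + r / 2)

theorem specRun_add_two (t : List Int) (r : Int) :
    specRun (r + 2) t = ((specRun r t).1, (specRun r t).2 + 1) := by
  induction t generalizing r with
  | nil =>
    simp only [specRun, Prod.mk.injEq]
    omega
  | cons v t ih =>
    by_cases hv : v = 1
    · simp only [specRun, if_pos hv]
      rw [show r + 2 + 1 = (r + 1) + 2 by ring, ih]
    · simp only [specRun, if_neg hv, Prod.mk.injEq]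
      omega

theorem specRun_one (r : Int) (t : List Int) : specRun r ((1:Int) :: t) = specRun (r+1) t := by
  simp [specRun]

theorem specRun_zero (r : Int) (t : List Int) :
    specRun r ((0:Int) :: t) = ((specRun 0 t).1 + r % 2, (specRun 0 t).2 + r / 2) := by
  simp [specRun]

theorem mapped_mem (s : String) (v : Int)
    (h : v ∈ s.toList.map (fun c => if c = '*' then (0 : Int) else 1)) : v = 0 ∨ v = 1 := by
  simp only [List.mem_map] at h
  obtain ⟨c, _, hc⟩ := h
  by_cases h' : c = '*' <;> simp [h'] at hc <;> omega

-- A's while loop computed by specRun on the segment row[i:m]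
theorem solveLoopA_eq (row : List Int) (m : Int)
    (h01 : ∀ v ∈ row, v = 0 ∨ v = 1) :
    ∀ i s1 s2, 0 ≤ i → (i < m → m ≤ (row.length : Int)) →
    solveLoopA row m i s1 s2 =
      (s1 + (specRun 0 ((row.take m.toNat).drop i.toNat)).1,
       s2 + (specRun 0 ((row.take m.toNat).drop i.toNat)).2) := by
  intro i s1 s2 hi hm
  induction hk : (m - i).toNat using Nat.strong_induction_on generalizing i s1 s2 with
  | _ k ih =>
  by_cases hlt : i < m
  · have hml := hm hlt
    have hseg : ∀ j : Int, 0 ≤ j → j < m →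
        ∃ v, PySem.List.pyGet? row j = some v ∧
          (row.take m.toNat).drop j.toNat = v :: (row.take m.toNat).drop (j.toNat + 1) := by
      intro j hj0 hjm
      have hjl : j.toNat < row.length := by omega
      refine ⟨row[j.toNat], PySem.List.pyGet?_eq_some_getElem row hj0 (by omega), ?_⟩
      have hlen : j.toNat < (row.take m.toNat).length := by
        simp only [List.length_take]; omega
      rw [List.drop_eq_getElem_cons hlen]
      congr 1
      simp [List.getElem_take]
    obtain ⟨v, hv, hdrop⟩ := hseg i hi hlt
    have hv01 : v = 0 ∨ v = 1 := h01 v (PySem.List.mem_of_pyGet?_eq_some row hv)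
    rw [solveLoopA]
    by_cases hlast : i ≠ m - 1
    · have hi1 : i + 1 < m := by omega
      obtain ⟨w, hw, hdrop2⟩ := hseg (i+1) (by omega) hi1
      have hw01 : w = 0 ∨ w = 1 := h01 w (PySem.List.mem_of_pyGet?_eq_some row hw)
      have hnat1 : (i+1).toNat = i.toNat + 1 := by omega
      have hnat2 : (i+2).toNat = i.toNat + 1 + 1 := by omega
      rw [hnat1] at hdrop2
      simp only [dif_pos hlt, if_pos hlast, hv, hw, Option.getD_some]
      by_cases hvw : v + w = 2
      · have hv1 : v = 1 := by omega
        have hw1 : w = 1 := by omega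
        rw [if_pos hvw, ih ((m - (i+2)).toNat) (by omega) (i+2) s1 (s2+1) (by omega) (fun _ => hml) rfl]
        rw [hdrop, hdrop2, hnat2, hv1, hw1, specRun_one, specRun_one,
          show (0:Int) + 1 + 1 = 0 + 2 by ring, specRun_add_two]
        simp only [Prod.mk.injEq]
        constructor <;> first | trivial | omega
      · rw [if_neg hvw]
        by_cases hv1 : v = 1
        · have hw0 : w = 0 := by omega
          rw [if_pos hv1, ih ((m - (i+2)).toNat) (by omega) (i+2) (s1+1) s2 (by omega) (fun _ => hml) rfl]
          rw [hdrop, hdrop2, hnat2, hv1, hw0, specRun_one, specRun_zero]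
          simp only [Prod.mk.injEq]
          constructor <;> first | trivial | omega
        · have hv0 : v = 0 := by omega
          rw [if_neg hv1, ih ((m - (i+1)).toNat) (by omega) (i+1) s1 s2 (by omega) (fun _ => hml) rfl]
          rw [hdrop, hnat1, hv0, specRun_zero]
          simp only [Prod.mk.injEq]
          constructor <;> first | trivial | omega
    · push_neg at hlast
      have hdropend : (row.take m.toNat).drop (i.toNat + 1) = [] := by
        apply List.drop_eq_nil_of_le
        simp only [List.length_take]
        omega
      simp only [dif_pos hlt, if_neg (by omega : ¬ i ≠ m - 1), hv, Option.getD_some]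
      have hnat1 : (i+1).toNat = i.toNat + 1 := by omega
      rcases hv01 with hv0 | hv1
      · rw [if_neg (by omega)]
        rw [ih ((m - (i+1)).toNat) (by omega) (i+1) s1 s2 (by omega) (by omega) rfl]
        rw [hdrop, hnat1, hdropend, hv0, specRun_zero]
        simp [specRun]
      · rw [if_pos hv1]
        rw [ih ((m - (i+1)).toNat) (by omega) (i+1) (s1+1) s2 (by omega) (by omega) rfl]
        rw [hdrop, hnat1, hdropend, hv1, specRun_one]
        simp [specRun]
  · rw [solveLoopA, dif_neg hlt]
    have hnil : (row.take m.toNat).drop i.toNat = [] := by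
      apply List.drop_eq_nil_of_le
      simp only [List.length_take]
      omega
    simp [hnil, specRun]

-- B's run-length fold computed by specRun
theorem rowCostB_eq (cs : List Char) (x y : Int) :
    ∀ (t r : Int),
    (let p := cs.foldl (fun (p : Int × Int) c =>
        if c ≠ '*' then (p.1, p.2 + 1)
        else (p.1 + PySem.Int.floordiv p.2 2 * y + PySem.Int.mod p.2 2 * x, 0)) (t, r);
      p.1 + PySem.Int.floordiv p.2 2 * y + PySem.Int.mod p.2 2 * x) =
    t + (specRun r (cs.map (fun c => if c = '*' then (0:Int) else 1))).1 * x
      + (specRun r (cs.map (fun c => if c = '*' then (0:Int) else 1))).2 * y := by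
  induction cs with
  | nil =>
    intro t r
    simp only [List.foldl_nil, List.map_nil, specRun,
      PySem.Int.floordiv_eq_ediv_of_pos (by norm_num : (0:Int) < 2),
      PySem.Int.mod_eq_emod_of_pos (by norm_num : (0:Int) < 2)]
    ring
  | cons c cs ih =>
    intro t r
    simp only [List.foldl_cons, List.map_cons]
    by_cases hc : c = '*'
    · rw [if_neg (by simp [hc]), ih]
      simp only [specRun, if_neg (by simp [hc] : ¬ (if c = '*' then (0:Int) else 1) = 1),
        PySem.Int.floordiv_eq_ediv_of_pos (by norm_num : (0:Int) < 2),
        PySem.Int.mod_eq_emod_of_pos (by norm_num : (0:Int) < 2)]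
      ring
    · rw [if_pos (by simp [hc]), ih]
      simp only [specRun, if_pos (by simp [hc] : (if c = '*' then (0:Int) else 1) = 1)]

theorem rowCostB_spec (cs : List Char) (x y : Int) :
    rowCostB cs x y =
      (specRun 0 (cs.map (fun c => if c = '*' then (0:Int) else 1))).1 * x
      + (specRun 0 (cs.map (fun c => if c = '*' then (0:Int) else 1))).2 * y := by
  have h := rowCostB_eq cs x y 0 0
  simpa [rowCostB] using h

theorem count_row (cs : List Char) :
    ∀ s : Int, (cs.map (fun c => if c = '*' then (0:Int) else 1)).foldl (· + ·) s
      = s + ((cs.filter (· ≠ '*')).length : Int) := by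
  induction cs with
  | nil => intro s; simp
  | cons c cs ih =>
    intro s
    by_cases hc : c = '*' <;> simp [List.filter_cons, hc, ih] <;> push_cast <;> ring

theorem cheap_branch (a : List String) (x : Int) :
    ∀ (s : Int),
    ((a.map (fun row => row.toList.map (fun c => if c = '*' then (0:Int) else 1))).foldl
        (fun res row => res + row.foldl (· + ·) 0) s) * x
      = x * a.foldl (fun s row => s + ((row.toList.filter (· ≠ '*')).length : Int)) s := by
  induction a with
  | nil => intro s; simp [mul_comm]
  | cons r a ih =>
    intro s
    simp only [List.map_cons, List.foldl_cons]
    rw [count_row, ih]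
    norm_num

theorem greedy_branch (a : List String) (m x y : Int)
    (hlen : ∀ row ∈ a, m ≤ (row.toList.length : Int)) :
    ∀ (s1 s2 t : Int),
    (let p := (a.map (fun row => row.toList.map (fun c => if c = '*' then (0:Int) else 1))).foldl
        (fun (p : Int × Int) row => solveLoopA row m 0 p.1 p.2) (s1, s2);
      p.1 * x + p.2 * y)
      = s1 * x + s2 * y + a.foldl (fun t row => t + rowCostB (row.toList.take (max 0 m).toNat) x y) t - t := by
  induction a with
  | nil => intro s1 s2 t; simp
  | cons r a ih =>
    intro s1 s2 t
    have h01 := mapped_mem r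
    have hl : m ≤ ((r.toList.map (fun c => if c = '*' then (0:Int) else 1)).length : Int) := by
      simpa using hlen r (by simp)
    have hloop := solveLoopA_eq (r.toList.map (fun c => if c = '*' then (0:Int) else 1)) m h01
        0 s1 s2 le_rfl (fun _ => hl)
    simp only [List.map_cons, List.foldl_cons]
    rw [hloop]
    simp only [Int.toNat_zero, List.drop_zero]
    have htake : (r.toList.map (fun c => if c = '*' then (0:Int) else 1)).take m.toNat
        = (r.toList.take (max 0 m).toNat).map (fun c => if c = '*' then (0:Int) else 1) := by
      rw [show m.toNat = (max 0 m).toNat by omega]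
      simp [List.map_take]
    rw [htake]
    have hrec := ih (fun row hr => hlen row (List.mem_cons_of_mem r hr))
        (s1 + (specRun 0 ((r.toList.take (max 0 m).toNat).map (fun c => if c = '*' then (0:Int) else 1))).1)
        (s2 + (specRun 0 ((r.toList.take (max 0 m).toNat).map (fun c => if c = '*' then (0:Int) else 1))).2)
        (t + rowCostB (r.toList.take (max 0 m).toNat) x y)
    rw [hrec, rowCostB_spec]
    ring

-- ===== VERDICT (by name: the statement is the Claim_ definition above) =====
theorem solve_spec : Claim_equal_solve := by
  intro n m x y a _ hpre
  unfold Spec_solve solve solve_alt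
  by_cases hy : y ≥ 2 * x
  · simp only [if_pos hy]
    exact cheap_branch a x 0
  · simp only [if_neg hy]
    have hlen : ∀ row ∈ a, m ≤ 0 ∨ m ≤ (row.toList.length : Int) := by
      rcases hpre with h | h | h
      · exact absurd h hy
      · exact fun row _ => Or.inl h
      · exact fun row hr => Or.inr (h row hr)
    by_cases hm : m ≤ 0
    · -- loop never runs (i = 0, ¬ 0 < m); B scans empty prefixes
      have hA : ∀ rows : List (List Int), ∀ s1 s2 : Int,
          rows.foldl (fun (p : Int × Int) row => solveLoopA row m 0 p.1 p.2) (s1, s2) = (s1, s2) := by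
        intro rows
        induction rows with
        | nil => intro s1 s2; rfl
        | cons r rows ih =>
          intro s1 s2
          simp only [List.foldl_cons]
          rw [solveLoopA, dif_neg (by omega)]
          exact ih s1 s2
      have hrow0 : ∀ row : String, rowCostB (row.toList.take (max 0 m).toNat) x y = 0 := by
        intro row
        rw [show (max 0 m).toNat = 0 by omega]
        simp [rowCostB, PySem.Int.floordiv, PySem.Int.mod, Int.fdiv, Int.fmod]
      have hid : ∀ (l : List String) (t : Int), l.foldl (fun t _ => t) t = t := by
        intro l
        induction l with
        | nil => intro t; rfl
        | cons r l ihl => intro t; simpa using ihl t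
      have hB : ∀ (l : List String) (t : Int), l.foldl (fun t row => t + rowCostB (row.toList.take (max 0 m).toNat) x y) t = t := by
        intro l t
        simp only [hrow0, add_zero]
        exact hid l t
      simp [hA, hB a 0]
    · have hlen' : ∀ row ∈ a, m ≤ (row.toList.length : Int) := by
        intro row hr
        rcases hlen row hr with h | h
        · omega
        · exact h
      have := greedy_branch a m x y hlen' 0 0 0
      simpa using this
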